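-- pv_equiv track=rewrite | github.com/sisiwuxi/helllo-git | python/inst_parser/inst_parser.py | get_bits_val
-- ===== SOURCE A (Python) =====
-- def set_bit_val(byte, index, val):
--     if val:
--         return byte | (1<<index)
--     else:
--         return byte & ~(1<<index)
--
-- def get_bits_val(byte, index1, index2):
-- 	index = index2 - index1 + 1
-- 	mask = 0
-- 	for i in range(index):
-- 		mask = set_bit_val(mask,i,1)
-- 	mask = mask << index1
-- 	ret = (byte & mask) >> index1
-- 	return ret
-- ===== SOURCE B (Python) =====
-- def get_bits_val(byte, index1, index2):
--     width = index2 - index1 + 1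
--     if width <= 0:
--         return 0
--     mask = ((1 << width) - 1) << index1
--     return (byte & mask) >> index1
-- ===== Notes on version B (the rewrite author's own statement) =====
-- stated objective: simpler
-- what changed: Replaces the bit-by-bit mask-building loop (via set_bit_val) with the closed-form mask ((1 << width) - 1) << index1, returning 0 directly when the field width is non-positive (where A's empty loop yields mask 0).
import Mathlib
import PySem

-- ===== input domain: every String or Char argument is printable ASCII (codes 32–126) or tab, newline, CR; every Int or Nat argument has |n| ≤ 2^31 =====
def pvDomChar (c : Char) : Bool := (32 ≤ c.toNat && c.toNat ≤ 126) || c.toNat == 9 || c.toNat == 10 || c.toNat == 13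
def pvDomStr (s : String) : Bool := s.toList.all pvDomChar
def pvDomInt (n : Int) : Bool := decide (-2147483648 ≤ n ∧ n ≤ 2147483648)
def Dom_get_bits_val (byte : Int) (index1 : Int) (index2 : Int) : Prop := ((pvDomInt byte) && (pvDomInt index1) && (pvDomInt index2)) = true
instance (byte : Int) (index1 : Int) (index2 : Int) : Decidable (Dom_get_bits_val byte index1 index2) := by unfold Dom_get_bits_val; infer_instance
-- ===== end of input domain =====

-- B replaces A's bit-by-bit mask-building loop with one closed-form mask ((1 << width) - 1) << index1.
-- ===== PORT A =====
def set_bit_val (byte : Int) (index : Int) (val : Int) : Int :=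
  if val ≠ 0 then PySem.Int.bor byte ((1:Int) <<< index.toNat)
  else PySem.Int.band byte (Int.not ((1:Int) <<< index.toNat))

-- shift counts: every 'i' in the loop comes from range(index) so 0 ≤ i; index1 ≥ 0 by Pre_
def get_bits_val (byte : Int) (index1 : Int) (index2 : Int) : Int :=
  let index := index2 - index1 + 1
  let mask := (PySem.List.pyRange 0 index 1).foldl (fun m i => set_bit_val m i 1) 0
  let mask2 := mask <<< index1.toNat
  (PySem.Int.band byte mask2) >>> index1.toNat

-- ===== PORT B =====
def get_bits_val_alt (byte : Int) (index1 : Int) (index2 : Int) : Int :=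
  let width := index2 - index1 + 1
  if width ≤ 0 then 0
  else
    let mask := (((1:Int) <<< width.toNat) - 1) <<< index1.toNat
    (PySem.Int.band byte mask) >>> index1.toNat

-- ===== PRECONDITION & SPEC =====
-- Pre_ excludes index1 < 0, where Python's 'mask << index1' / '>> index1' raises ValueError
def Pre_get_bits_val (byte : Int) (index1 : Int) (index2 : Int) : Prop := 0 ≤ index1
instance (byte : Int) (index1 : Int) (index2 : Int) : Decidable (Pre_get_bits_val byte index1 index2) := by unfold Pre_get_bits_val; infer_instance
def pvWitness_get_bits_val : Int × Int × Int := (44, 2, 4)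

def Spec_get_bits_val (byte : Int) (index1 : Int) (index2 : Int) (out : Int) : Prop := out = get_bits_val_alt byte index1 index2
instance (byte : Int) (index1 : Int) (index2 : Int) (out : Int) : Decidable (Spec_get_bits_val byte index1 index2 out) := by unfold Spec_get_bits_val; infer_instance

-- ===== CLAIM (what is proved, stated in full; the proofs are below) =====
def Claim_equal_get_bits_val : Prop := ∀ (byte : Int) (index1 : Int) (index2 : Int), Dom_get_bits_val byte index1 index2 → Pre_get_bits_val byte index1 index2 → Spec_get_bits_val byte index1 index2 (get_bits_val byte index1 index2)

-- ===== LEMMAS AND PROOFS =====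
theorem nat_mask_or : ∀ (n : Nat), (2 ^ n - 1) ||| 2 ^ n = 2 ^ (n + 1) - 1 := by
  intro n
  apply Nat.eq_of_testBit_eq
  intro i
  simp only [Nat.testBit_lor, Nat.testBit_two_pow_sub_one, Nat.testBit_two_pow]
  by_cases h1 : i < n + 1 <;> by_cases h2 : i < n <;> by_cases h3 : n = i <;>
    simp [h1, h2, h3] <;> omega

theorem loop_mask (n : Nat) :
    (PySem.List.pyRange 0 (n : Int) 1).foldl (fun m i => set_bit_val m i 1) 0
      = ((2 ^ n : Nat) : Int) - 1 := by
  induction n with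
  | zero => simp [PySem.List.pyRange]
  | succ k ih =>
    have h : (PySem.List.pyRange 0 ((k + 1 : Nat) : Int) 1)
        = PySem.List.pyRange 0 (k : Int) 1 ++ [(k : Int)] := by
      have := PySem.List.pyRange_one_succ_right (a := 0) (b := (k : Int)) (by omega)
      simpa [Int.add_comm] using this
    rw [h, List.foldl_append, ih]
    simp only [List.foldl_cons, List.foldl_nil, set_bit_val]
    rw [if_pos (by norm_num)]
    have h1 : ((2 ^ k : Nat) : Int) - 1 = (((2 ^ k - 1 : Nat)) : Int) := by
      push_cast [Nat.one_le_two_pow]; ring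
    have h2 : ((1 : Int) <<< (k : Int).toNat) = (((2 ^ k : Nat)) : Int) := by
      simp [Int.shiftLeft_eq]
    rw [h1, h2, PySem.Int.bor_natCast, nat_mask_or]
    push_cast [Nat.one_le_two_pow]; ring

-- ===== VERDICT (by name: the statement is the Claim_ definition above) =====
theorem get_bits_val_spec : Claim_equal_get_bits_val := by
  intro byte index1 index2 _ hpre
  unfold Pre_get_bits_val at hpre
  unfold Spec_get_bits_val get_bits_val get_bits_val_alt
  simp only []
  set w := index2 - index1 + 1 with hw
  by_cases hneg : w ≤ 0
  · have hr : PySem.List.pyRange 0 w 1 = [] := PySem.List.pyRange_one_eq_nil (by omega)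
    rw [if_pos hneg, hr]
    simp [PySem.Int.band_zero]
  · rw [if_neg hneg]
    have hwn : w = ((w.toNat : Nat) : Int) := by omega
    have hm := loop_mask w.toNat
    rw [← hwn] at hm
    rw [hm]
    have : ((2 ^ w.toNat : Nat) : Int) - 1 = ((1:Int) <<< w.toNat) - 1 := by
      simp [Int.shiftLeft_eq]
    rw [this]
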